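-- pv_equiv track=rewrite | github.com/AYUSH-PANDA2301/Assignment1 | programming_assignment25.py | ascii_capitalize
-- ===== SOURCE A (Python) =====
-- def ascii_capitalize(a):
--     b = ""
--     for i in range(len(a)):
--         if (ord(a[i])%2 == 0):
--             b = b + a[i].upper()
--         else:
--              b = b + a[i].lower()
--     return b
-- ===== SOURCE B (Python) =====
-- def ascii_capitalize(a):
--     table = {ord(c): (c.upper() if ord(c) % 2 == 0 else c.lower()) for c in a}
--     return a.translate(table)
-- ===== Notes on version B (the rewrite author's own statement) =====
-- stated objective: idiomatic
-- what changed: B builds a codepoint-keyed translation table once (dict comprehension) and maps the whole string through str.translate in one library pass, instead of an index loop with repeated string concatenation.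
import Mathlib
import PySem

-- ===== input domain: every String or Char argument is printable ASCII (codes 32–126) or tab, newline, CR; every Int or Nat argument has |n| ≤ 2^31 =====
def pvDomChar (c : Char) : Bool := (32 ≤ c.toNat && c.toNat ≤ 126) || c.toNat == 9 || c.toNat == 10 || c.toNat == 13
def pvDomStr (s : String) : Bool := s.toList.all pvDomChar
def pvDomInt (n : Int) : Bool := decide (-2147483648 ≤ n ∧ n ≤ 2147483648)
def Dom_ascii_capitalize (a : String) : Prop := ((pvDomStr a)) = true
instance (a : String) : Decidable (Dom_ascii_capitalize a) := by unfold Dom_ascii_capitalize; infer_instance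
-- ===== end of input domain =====

-- B replaces A's index loop with a translation table built once and applied by str.translate (idiomatic).

-- ===== PORT A =====
def ascii_capitalize (a : String) : String :=
  String.ofList ((PySem.List.pyRange 0 (PySem.Str.len a) 1).foldl
    (fun b i =>
      let c := PySem.List.pyGetD a.toList i ' '   -- a[i]: index always in range here
      if c.toNat % 2 == 0 then b ++ PySem.Chars.upper [c] else b ++ PySem.Chars.lower [c]) [])

-- ===== PORT B =====
def ascii_capitalize_alt (a : String) : String :=
  let table : PySem.Dict Int (List Char) :=
    a.toList.foldl (fun d c =>
      d.insert (c.toNat : Int)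
        (if c.toNat % 2 == 0 then PySem.Chars.upper [c] else PySem.Chars.lower [c]))
      PySem.Dict.empty
  String.ofList ((a.toList.map (fun c => table.getD (c.toNat : Int) [c])).flatten)

-- ===== PRECONDITION & SPEC =====
def Spec_ascii_capitalize (a : String) (out : String) : Prop := out = ascii_capitalize_alt a
instance (a : String) (out : String) : Decidable (Spec_ascii_capitalize a out) := by unfold Spec_ascii_capitalize; infer_instance

-- ===== CLAIM (what is proved, stated in full; the proofs are below) =====
def Claim_equal_ascii_capitalize : Prop := ∀ (a : String), Dom_ascii_capitalize a → Spec_ascii_capitalize a (ascii_capitalize a)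

-- ===== LEMMAS AND PROOFS =====

-- the per-character transform shared by both programs
def pvTrans (c : Char) : List Char :=
  if c.toNat % 2 == 0 then PySem.Chars.upper [c] else PySem.Chars.lower [c]

lemma getD_foldl_insert_notkey (t : List Char) (d : PySem.Dict Int (List Char)) (k : Int)
    (dflt : List Char) (h : ∀ x ∈ t, (x.toNat : Int) ≠ k) :
    (t.foldl (fun d c => d.insert (c.toNat : Int) (pvTrans c)) d).getD k dflt = d.getD k dflt := by
  induction t generalizing d with
  | nil => rfl
  | cons x t ih =>
      simp only [List.foldl_cons]
      rw [ih _ (fun y hy => h y (List.mem_cons_of_mem _ hy))]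
      exact PySem.Dict.getD_insert_of_ne _ _ _ (fun he => h x List.mem_cons_self he.symm)

lemma table_getD (l : List Char) (d : PySem.Dict Int (List Char)) (c : Char) (hc : c ∈ l) :
    (l.foldl (fun d c => d.insert (c.toNat : Int) (pvTrans c)) d).getD (c.toNat : Int) [c]
      = pvTrans c := by
  induction l generalizing d with
  | nil => cases hc
  | cons x t ih =>
      simp only [List.foldl_cons]
      by_cases hct : c ∈ t
      · exact ih _ hct
      · have hcx : c = x := by
          rcases List.mem_cons.mp hc with h | h
          · exact h
          · exact absurd h hct
        subst hcx
        rw [getD_foldl_insert_notkey t _ _ _ (fun y hy he => hct (by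
          have hn : y.toNat = c.toNat := by exact_mod_cast he
          have : y = c := Char.ext (UInt32.toNat_inj.mp hn)
          rwa [this] at hy))]
        exact PySem.Dict.getD_insert_self _ _ _ _

-- ===== VERDICT (by name: the statement is the Claim_ definition above) =====
theorem ascii_capitalize_spec : Claim_equal_ascii_capitalize := by
  intro a _
  show ascii_capitalize a = ascii_capitalize_alt a
  unfold ascii_capitalize ascii_capitalize_alt
  have hA : (PySem.List.pyRange 0 (PySem.Str.len a) 1).foldl
      (fun b i =>
        let c := PySem.List.pyGetD a.toList i ' '
        if c.toNat % 2 == 0 then b ++ PySem.Chars.upper [c] else b ++ PySem.Chars.lower [c]) []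
      = a.toList.foldl (fun b c => b ++ pvTrans c) [] := by
    rw [show PySem.Str.len a = PySem.List.len a.toList from by simp [PySem.Str.len_eq, PySem.List.len]]
    rw [PySem.List.foldl_pyRange_zero_pyGetD a.toList ' '
      (fun b c => if c.toNat % 2 == 0 then b ++ PySem.Chars.upper [c] else b ++ PySem.Chars.lower [c]) []]
    apply PySem.List.foldl_congr_mem
    intro b c _
    by_cases h : c.toNat % 2 == 0 <;> simp [pvTrans, h]
  rw [hA, PySem.List.foldl_append_eq_flatMap]
  congr 1
  show [] ++ List.flatMap pvTrans a.toList
      = (a.toList.map (fun c =>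
          (a.toList.foldl (fun d c => d.insert (c.toNat : Int) (pvTrans c)) PySem.Dict.empty).getD
            (c.toNat : Int) [c])).flatten
  rw [List.map_congr_left (fun c hc => table_getD a.toList PySem.Dict.empty c hc)]
  simp [List.flatMap_def]
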